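-- pv_equiv track=rewrite | github.com/relspas/advent-of-code-2023 | day1.py | getNumFromLine
-- ===== SOURCE A (Python) =====
-- def getNumFromLine(str_):
--     first = ""
--     last = ""
--     for c in str_:
--         if c.isdigit():
--             first = c
--             break
--     for c in str_[::-1]:
--         if c.isdigit():
--             last = c
--             break
--     return int(first+last)
-- ===== SOURCE B (Python) =====
-- def getNumFromLine(str_):
--     digits = [c for c in str_ if c.isdigit()]
--     first = digits[0] if digits else ""
--     last = digits[-1] if digits else ""
--     return int(first + last)
-- ===== Notes on version B (the rewrite author's own statement) =====
-- stated objective: simpler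
-- what changed: Replaces A's two early-exit scans (forward for the first digit, over the reversed string for the last) with one comprehension collecting all digits and indexing both ends of that list.
-- outside the precondition, e.g. on getNumFromLine(''): A raises ValueError, B raises ValueError
import Mathlib
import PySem

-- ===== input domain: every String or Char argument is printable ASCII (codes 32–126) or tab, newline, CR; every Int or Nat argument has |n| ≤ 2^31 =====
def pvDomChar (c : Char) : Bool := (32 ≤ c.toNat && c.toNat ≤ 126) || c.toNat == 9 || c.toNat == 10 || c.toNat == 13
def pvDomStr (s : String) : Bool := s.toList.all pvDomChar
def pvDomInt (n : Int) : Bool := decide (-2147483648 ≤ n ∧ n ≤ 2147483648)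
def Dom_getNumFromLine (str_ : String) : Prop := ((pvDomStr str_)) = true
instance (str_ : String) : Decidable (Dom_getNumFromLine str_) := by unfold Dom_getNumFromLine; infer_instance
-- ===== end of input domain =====

-- B replaces A's two early-exit scans with one digit-collecting pass indexed at both ends (simpler decomposition, same cost).

-- ===== PORT A =====
-- the first for-loop with break: returns the first digit as a one-char string, "" if none
def pvFirstDigitLoop : List Char → String
  | [] => ""
  | c :: cs => if PySem.Chars.isdigit c then String.mk [c] else pvFirstDigitLoop cs

def getNumFromLine (str_ : String) : Int :=
  let first := pvFirstDigitLoop str_.toList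
  let last := pvFirstDigitLoop str_.toList.reverse   -- str_[::-1]
  (PySem.Int.ofStr? (first ++ last)).getD 0          -- int(first+last); Pre_ excludes the raising case (none)

-- ===== PORT B =====
def getNumFromLine_alt (str_ : String) : Int :=
  let digits := str_.toList.filter PySem.Chars.isdigit
  let first := match digits.head? with | some c => String.mk [c] | none => ""
  let last := match digits.getLast? with | some c => String.mk [c] | none => ""
  (PySem.Int.ofStr? (first ++ last)).getD 0          -- int(first+last); Pre_ excludes the raising case (none)

-- ===== PRECONDITION & SPEC =====
-- Pre_ excludes exactly the strings with no digit character, on which A (and B) raise ValueError via int("").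
def Pre_getNumFromLine (str_ : String) : Prop := str_.toList.any PySem.Chars.isdigit = true
instance (str_ : String) : Decidable (Pre_getNumFromLine str_) := by unfold Pre_getNumFromLine; infer_instance
def pvWitness_getNumFromLine : String := "a1b2"
def Spec_getNumFromLine (str_ : String) (out : Int) : Prop := out = getNumFromLine_alt str_
instance (str_ : String) (out : Int) : Decidable (Spec_getNumFromLine str_ out) := by unfold Spec_getNumFromLine; infer_instance

-- ===== CLAIM (what is proved, stated in full; the proofs are below) =====
def Claim_equal_getNumFromLine : Prop := ∀ (str_ : String), Dom_getNumFromLine str_ → Pre_getNumFromLine str_ → Spec_getNumFromLine str_ (getNumFromLine str_)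

-- ===== LEMMAS AND PROOFS =====

-- A's break-loop returns the head of the digit filter (as a one-char string)
theorem pvFirstDigitLoop_eq (xs : List Char) :
    pvFirstDigitLoop xs =
      (match (xs.filter PySem.Chars.isdigit).head? with
        | some c => String.mk [c] | none => "") := by
  induction xs with
  | nil => rfl
  | cons c cs ih =>
    by_cases h : PySem.Chars.isdigit c
    · simp [pvFirstDigitLoop, h]
    · simp [pvFirstDigitLoop, h, ih]

-- ===== VERDICT (by name: the statement is the Claim_ definition above) =====
theorem getNumFromLine_spec : Claim_equal_getNumFromLine := by
  intro str_ _ _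
  unfold Spec_getNumFromLine getNumFromLine getNumFromLine_alt
  simp only [pvFirstDigitLoop_eq, List.filter_reverse, List.head?_reverse]
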